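-- pv_equiv track=rewrite | github.com/MrBrantCode/unitest_baseline | mut_generate/mist_train_cf/cf_62079/solution.py | count_reverse_pairs
-- ===== SOURCE A (Python) =====
-- def count_reverse_pairs(lst):
--     count = 0
--     for i in range(len(lst)):
--         for j in range(i+1, len(lst)):
--             str1 = ''.join(e for e in lst[i] if e.isalpha())
--             str2 = ''.join(e for e in lst[j] if e.isalpha())
--             if str1 == str2[::-1]:
--                 count += 1
--     return count
-- ===== SOURCE B (Python) =====
-- def count_reverse_pairs(lst):
--     # One pass: count, for each element, earlier elements whose filtered string
--     # equals the reverse of this element's filtered string (hashmap of counts).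
--     count = 0
--     seen = {}
--     for s in lst:
--         f = ''.join(filter(str.isalpha, s))
--         count += seen.get(f[::-1], 0)
--         seen[f] = seen.get(f, 0) + 1
--     return count
-- ===== Notes on version B (the rewrite author's own statement) =====
-- stated objective: faster
-- what changed: Replaced the quadratic all-pairs scan (recomputing both filtered strings per pair) with a single pass that filters each string once and counts reverse matches among earlier elements via a hashmap of filtered-string multiplicities.
import Mathlib
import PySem

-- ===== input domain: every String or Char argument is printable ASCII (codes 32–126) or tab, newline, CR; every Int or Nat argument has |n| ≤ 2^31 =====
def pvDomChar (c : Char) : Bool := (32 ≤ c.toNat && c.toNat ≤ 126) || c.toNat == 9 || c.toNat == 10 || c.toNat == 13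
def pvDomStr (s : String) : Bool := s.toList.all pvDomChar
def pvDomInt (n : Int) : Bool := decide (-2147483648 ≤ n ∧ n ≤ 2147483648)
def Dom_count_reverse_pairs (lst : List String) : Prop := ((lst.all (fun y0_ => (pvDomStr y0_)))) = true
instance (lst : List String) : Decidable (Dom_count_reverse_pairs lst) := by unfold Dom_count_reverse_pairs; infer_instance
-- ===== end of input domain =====

-- B replaces A's all-pairs double loop by one pass with a hashmap of filtered-string counts (asymptotically faster); return values agree on all inputs.

-- ===== PORT A =====
-- ''.join(e for e in s if e.isalpha())
def pvFiltA (s : String) : List Char :=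
  s.toList.foldl (fun acc e => if PySem.Chars.isalpha e then acc ++ [e] else acc) []

def count_reverse_pairs (lst : List String) : Int :=
  (PySem.List.pyRange 0 (PySem.List.len lst) 1).foldl
    (fun count i =>
      (PySem.List.pyRange (i + 1) (PySem.List.len lst) 1).foldl
        (fun count j =>
          let str1 := pvFiltA (PySem.List.pyGetD lst i "")
          let str2 := pvFiltA (PySem.List.pyGetD lst j "")
          if str1 = str2.reverse then count + 1 else count)  -- str2[::-1] is reverse
        count)
    0

-- ===== PORT B =====
-- ''.join(filter(str.isalpha, s))
def pvFiltB (s : String) : List Char :=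
  s.toList.filter PySem.Chars.isalpha

def count_reverse_pairs_alt (lst : List String) : Int :=
  (lst.foldl
    (fun (st : Int × PySem.Dict (List Char) Int) s =>
      let f := pvFiltB s
      (st.1 + st.2.getD f.reverse 0, st.2.insert f (st.2.getD f 0 + 1)))
    ((0 : Int), (PySem.Dict.empty : PySem.Dict (List Char) Int))).1

-- ===== PRECONDITION & SPEC =====
def Spec_count_reverse_pairs (lst : List String) (out : Int) : Prop := out = count_reverse_pairs_alt lst
instance (lst : List String) (out : Int) : Decidable (Spec_count_reverse_pairs lst out) := by unfold Spec_count_reverse_pairs; infer_instance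

-- ===== CLAIM (what is proved, stated in full; the proofs are below) =====
def Claim_equal_count_reverse_pairs : Prop := ∀ (lst : List String), Dom_count_reverse_pairs lst → Spec_count_reverse_pairs lst (count_reverse_pairs lst)

-- ===== LEMMAS AND PROOFS =====

-- pair count of the list of filtered strings, recursing on the FIRST element
def pvPC : List (List Char) → Int
  | [] => 0
  | f :: rest => (rest.count f.reverse : Int) + pvPC rest

-- B's running count: for each element, matches among the already-seen prefix
def pvBQ : List (List Char) → List (List Char) → Int
  | _, [] => 0
  | seen, f :: rest => (seen.count f.reverse : Int) + pvBQ (seen ++ [f]) rest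

theorem pvRev_iff (a b : List Char) : a = b.reverse ↔ b = a.reverse := by
  constructor <;> (intro h; rw [h, List.reverse_reverse])

-- ---- A-side: the double index loop computes pvPC ----
theorem pvA_outer (lst : List String) (m k : Nat) (hk : lst.length = k + m) (acc : Int) :
    (PySem.List.pyRange (k : Int) (PySem.List.len lst) 1).foldl
      (fun count i =>
        (PySem.List.pyRange (i + 1) (PySem.List.len lst) 1).foldl
          (fun count j =>
            if pvFiltA (PySem.List.pyGetD lst i "") = (pvFiltA (PySem.List.pyGetD lst j "")).reverse
            then count + 1 else count)
          count)
      acc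
    = acc + pvPC ((lst.drop k).map pvFiltA) := by
  induction m generalizing k acc with
  | zero =>
      rw [PySem.List.pyRange_one_eq_nil
        (show PySem.List.len lst ≤ (k : Int) by simp [PySem.List.len_eq]; omega)]
      rw [List.drop_eq_nil_of_le (by omega)]
      simp [pvPC]
  | succ m ih =>
      have hklt : k < lst.length := by omega
      rw [PySem.List.pyRange_one_cons
        (show (k : Int) < PySem.List.len lst by simp [PySem.List.len_eq]; exact_mod_cast hklt)]
      simp only [List.foldl_cons]
      have hinner :
          (PySem.List.pyRange ((k : Int) + 1) (PySem.List.len lst) 1).foldl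
            (fun count j =>
              if pvFiltA (PySem.List.pyGetD lst (k : Int) "") = (pvFiltA (PySem.List.pyGetD lst j "")).reverse
              then count + 1 else count)
            acc
          = acc + (((lst.drop (k+1)).map pvFiltA).count (pvFiltA (PySem.List.pyGetD lst (k : Int) "")).reverse : Int) := by
        have h1 := PySem.List.foldl_pyRange_pyGetD (xs := lst) (a := (k : Int) + 1) (d := "")
          (f := fun count s =>
            if pvFiltA (PySem.List.pyGetD lst (k : Int) "") = (pvFiltA s).reverse then count + 1 else count)
          (init := acc) (by omega)
        rw [show ((k : Int) + 1) = ((k + 1 : Nat) : Int) by push_cast; ring] at h1 ⊢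
        rw [h1]
        simp only [Int.toNat_natCast]
        rw [PySem.List.foldl_ite_add_one
          (p := fun s => pvFiltA (PySem.List.pyGetD lst ((k : Nat) : Int) "") = (pvFiltA s).reverse)]
        congr 1
        rw [List.count_eq_countP, List.countP_map]
        norm_cast
        apply List.countP_congr
        intro s _
        simp only [Function.comp_apply, beq_iff_eq, decide_eq_true_eq]
        exact pvRev_iff _ _
      rw [hinner,
        show ((k : Int) + 1) = ((k + 1 : Nat) : Int) by push_cast; ring,
        ih (k+1) (by omega)]
      have hdrop : lst.drop k = lst[k] :: lst.drop (k+1) := List.drop_eq_getElem_cons hklt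
      rw [hdrop]
      simp only [List.map_cons, pvPC]
      have hget : PySem.List.pyGetD lst ((k : Nat) : Int) "" = lst[k] := by
        simp [PySem.List.pyGetD_natCast, List.getD_eq_getElem?_getD, List.getElem?_eq_getElem hklt]
      rw [hget]
      ring

theorem pvA_eq (lst : List String) : count_reverse_pairs lst = pvPC (lst.map pvFiltA) := by
  have := pvA_outer lst lst.length 0 (by omega) 0
  simpa [count_reverse_pairs] using this

-- ---- B-side: the fold computes pvBQ [] ----
theorem pvB_loop (lst : List String) (c : Int) (d : PySem.Dict (List Char) Int)
    (seen : List (List Char)) (hd : ∀ v, d.getD v 0 = (seen.count v : Int)) :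
    (lst.foldl
      (fun (st : Int × PySem.Dict (List Char) Int) s =>
        let f := pvFiltB s
        (st.1 + st.2.getD f.reverse 0, st.2.insert f (st.2.getD f 0 + 1)))
      (c, d)).1
    = c + pvBQ seen (lst.map pvFiltB) := by
  induction lst generalizing c d seen with
  | nil => simp [pvBQ]
  | cons s rest ih =>
      simp only [List.foldl_cons, List.map_cons, pvBQ]
      rw [ih (c + d.getD (pvFiltB s).reverse 0)
            (d.insert (pvFiltB s) (d.getD (pvFiltB s) 0 + 1)) (seen ++ [pvFiltB s]) ?_]
      · rw [hd]; ring
      · intro v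
        rw [PySem.Dict.getD_insert, hd, List.count_append]
        by_cases hv : v = pvFiltB s
        · subst hv; simp
        · simp [hv, Ne.symm hv, hd v]

theorem pvB_eq (lst : List String) : count_reverse_pairs_alt lst = pvBQ [] (lst.map pvFiltB) := by
  have := pvB_loop lst 0 PySem.Dict.empty [] (by intro v; simp [PySem.Dict.getD_empty])
  simpa [count_reverse_pairs_alt] using this

-- ---- bridge: prefix-scanning pair count = left-recursing pair count ----
def pvS (seen : List (List Char)) (fs : List (List Char)) : Int :=
  (fs.map (fun g => (seen.count g.reverse : Int))).sum

theorem pvS_append_singleton (seen : List (List Char)) (f : List Char) (fs : List (List Char)) :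
    pvS (seen ++ [f]) fs = pvS seen fs + (fs.count f.reverse : Int) := by
  unfold pvS
  have hpt : ∀ g : List Char,
      ((seen ++ [f]).count g.reverse : Int)
        = (seen.count g.reverse : Int) + (if decide (g = f.reverse) then (1:Int) else 0) := by
    intro g
    rw [List.count_append]
    push_cast
    by_cases h : g = f.reverse
    · simp [h]
    · have h2 : g.reverse ≠ f := fun hc => h (by rw [← hc, List.reverse_reverse])
      rw [List.count_eq_zero.mpr (fun hc => h2 (List.mem_singleton.mp hc))]
      simp [h]
  calc (fs.map (fun g => ((seen ++ [f]).count g.reverse : Int))).sum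
      = (fs.map (fun g => (seen.count g.reverse : Int) + (if decide (g = f.reverse) then (1:Int) else 0))).sum := by
        congr 1; exact List.map_congr_left (fun g _ => hpt g)
    _ = (fs.map (fun g => (seen.count g.reverse : Int))).sum
        + (fs.map (fun g => (if decide (g = f.reverse) then (1:Int) else 0))).sum := by
        rw [← List.sum_map_add]
    _ = (fs.map (fun g => (seen.count g.reverse : Int))).sum + (fs.count f.reverse : Int) := by
        rw [PySem.List.sum_map_ite_one_zero]
        congr 2
        rw [List.count_eq_countP]
        apply List.countP_congr
        intro g _
        simp only [beq_iff_eq, decide_eq_true_eq]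

theorem pvBQ_eq (fs : List (List Char)) : ∀ seen, pvBQ seen fs = pvS seen fs + pvPC fs := by
  induction fs with
  | nil => intro seen; simp [pvBQ, pvS, pvPC]
  | cons f rest ih =>
      intro seen
      simp only [pvBQ, pvPC]
      rw [ih, pvS_append_singleton]
      have hcons : pvS seen (f :: rest) = (seen.count f.reverse : Int) + pvS seen rest := by
        simp [pvS]
      rw [hcons]
      ring

theorem pvS_nil (fs : List (List Char)) : pvS [] fs = 0 := by
  simp [pvS]

-- ===== VERDICT (by name: the statement is the Claim_ definition above) =====
theorem count_reverse_pairs_spec : Claim_equal_count_reverse_pairs := by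
  intro lst _
  unfold Spec_count_reverse_pairs
  rw [pvA_eq, pvB_eq, pvBQ_eq, pvS_nil]
  have h : pvFiltA = pvFiltB := by
    funext s
    simpa [pvFiltB] using PySem.List.foldl_append_if_eq_filter PySem.Chars.isalpha s.toList []
  rw [h]
  ring
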